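-- pv_equiv track=rewrite | github.com/need-singularity/sylvian-singularity | .shared/calc/topos_divisor_analysis.py | antichains
-- ===== SOURCE A (Python) =====
-- import itertools
--
-- def antichains(objs):
--     """Find all antichains (sets of pairwise incomparable elements)."""
--     acs = []
--     for r in range(len(objs) + 1):
--         for subset in itertools.combinations(objs, r):
--             is_ac = True
--             for a, b in itertools.combinations(subset, 2):
--                 if a % b == 0 or b % a == 0:
--                     is_ac = False
--                     break
--             if is_ac:
--                 acs.append(subset)
--     return acs
-- ===== SOURCE B (Python) =====
-- def antichains(objs):
--     """Find all antichains by level-wise pruned extension (only valid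
--     antichains are ever built), emitting levels in order of size."""
--     def incomp(a, b):
--         return (b == 0 or a % b != 0) and (a == 0 or b % a != 0)
--     results = []
--     level = [([], objs)]
--     while level:
--         nxt = []
--         for chain, rest in level:
--             results.append(tuple(chain))
--             for i, x in enumerate(rest):
--                 if all(incomp(y, x) for y in chain):
--                     nxt.append((chain + [x], rest[i + 1:]))
--         level = nxt
--     return results
-- ===== Notes on version B (the rewrite author's own statement) =====
-- stated objective: alternative
-- what changed: A enumerates every one of the 2^n subsets and re-tests all pairs inside each; B does a level-wise pruned search that only ever extends already-valid antichains by one element (checking the new element against the chain), emitting levels in size order, so no invalid subset is ever generated.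
-- crash fix: A raises ZeroDivisionError whenever 0 occurs after the first position of objs (a % 0 is evaluated for the pair preceding it); B returns the antichain list there, since 0 is divisible by every integer and so joins no antichain of size >= 2. — e.g. on antichains([1, 0]): A raises ZeroDivisionError, B returns [[], [1], [0]]
import Mathlib
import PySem

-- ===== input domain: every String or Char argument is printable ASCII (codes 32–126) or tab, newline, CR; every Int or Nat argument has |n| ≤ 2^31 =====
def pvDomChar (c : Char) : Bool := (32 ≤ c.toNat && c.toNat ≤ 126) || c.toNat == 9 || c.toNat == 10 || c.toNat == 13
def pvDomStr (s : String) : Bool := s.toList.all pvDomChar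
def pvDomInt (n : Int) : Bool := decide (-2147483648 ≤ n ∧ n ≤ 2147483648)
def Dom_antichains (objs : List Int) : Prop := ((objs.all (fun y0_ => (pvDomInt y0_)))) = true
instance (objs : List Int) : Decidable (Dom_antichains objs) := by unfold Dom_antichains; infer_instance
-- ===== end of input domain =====

-- B replaces A's test-every-subset enumeration (each subset re-checked pairwise) by a
-- level-wise pruned search that only ever extends already-valid antichains; objective: alternative.

-- ===== PORT A =====
-- itertools.combinations(l, r), in itertools order (lexicographic by positions)
def combosA : Nat → List Int → List (List Int)
  | 0, _ => [[]]
  | _+1, [] => []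
  | r+1, x :: xs => (combosA r xs).map (fun s => x :: s) ++ combosA (r+1) xs

-- itertools.combinations(subset, 2), as the list of pairs it yields
def pairsA : List Int → List (Int × Int)
  | [] => []
  | x :: xs => xs.map (fun y => (x, y)) ++ pairsA xs

-- the inner `for a, b …: if a % b == 0 or b % a == 0: is_ac = False; break` loop
def isAcA (subset : List Int) : Bool :=
  (pairsA subset).all (fun p => !(PySem.Int.mod p.1 p.2 == 0 || PySem.Int.mod p.2 p.1 == 0))

def antichains (objs : List Int) : List (List Int) :=
  (List.range (objs.length + 1)).foldl
    (fun acs r => acs ++ ((combosA r objs).filter isAcA)) []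

-- ===== PORT B =====
def incompB (a b : Int) : Bool :=
  (b == 0 || !(PySem.Int.mod a b == 0)) && (a == 0 || !(PySem.Int.mod b a == 0))

-- the `for i, x in enumerate(rest): if all(...): nxt.append((chain + [x], rest[i+1:]))` loop
def expandB (chain : List Int) : List Int → List (List Int × List Int)
  | [] => []
  | x :: rest =>
    (if chain.all (fun y => incompB y x) then [(chain ++ [x], rest)] else []) ++ expandB chain rest

-- the `while level:` loop (fuel len+1 suffices: each round strictly shortens every `rest`)
def bfsB : Nat → List (List Int × List Int) → List (List Int)
  | _, [] => []
  | 0, _ :: _ => []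
  | fuel+1, c :: level =>
    ((c :: level).map Prod.fst) ++
      bfsB fuel ((c :: level).flatMap (fun cr => expandB cr.1 cr.2))

def antichains_alt (objs : List Int) : List (List Int) :=
  bfsB (objs.length + 1) [([], objs)]

-- ===== PRECONDITION & SPEC =====
-- Pre_ excludes exactly the inputs on which A raises ZeroDivisionError: those where 0 occurs
-- after the first position (the pair (a, 0) is then reached and `a % 0` raises).
def Pre_antichains (objs : List Int) : Prop := (0 : Int) ∉ objs.drop 1
instance (objs : List Int) : Decidable (Pre_antichains objs) := by unfold Pre_antichains; infer_instance
def pvWitness_antichains : List Int := [0, 3, 4, 6]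

-- A raises ZeroDivisionError whenever 0 occurs after the first position; B returns the
-- antichain list there (0 is divisible by everything, so it joins no antichain of size ≥ 2).
-- (Checkable form: antichains_raises at the bottom of the file.)
def Raises_antichains (objs : List Int) : Prop := (0 : Int) ∈ objs.drop 1
instance (objs : List Int) : Decidable (Raises_antichains objs) := by unfold Raises_antichains; infer_instance
def pvRaiseWitness_antichains : List Int := [1, 0]
def pvRaiseWitnessOut_antichains : List (List Int) := [[], [1], [0]]

def Spec_antichains (objs : List Int) (out : List (List Int)) : Prop := out = antichains_alt objs
instance (objs : List Int) (out : List (List Int)) : Decidable (Spec_antichains objs out) := by unfold Spec_antichains; infer_instance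

-- ===== CLAIM (what is proved, stated in full; the proofs are below) =====
def Claim_equal_antichains : Prop := ∀ (objs : List Int), Dom_antichains objs → Pre_antichains objs → Spec_antichains objs (antichains objs)
def Claim_raises_antichains : Prop := (∀ (objs : List Int), Dom_antichains objs → Raises_antichains objs → ¬ Pre_antichains objs) ∧ (Dom_antichains (pvRaiseWitness_antichains) ∧ Raises_antichains (pvRaiseWitness_antichains) ∧ antichains_alt (pvRaiseWitness_antichains) = pvRaiseWitnessOut_antichains)

-- ===== LEMMAS AND PROOFS =====

-- generic helpers
theorem all_congr' {α : Type} (l : List α) (p q : α → Bool)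
    (h : ∀ x ∈ l, p x = q x) : l.all p = l.all q := by
  induction l with
  | nil => rfl
  | cons x xs ih =>
    simp only [List.all_cons]
    rw [h x (by simp), ih (fun y hy => h y (by simp [hy]))]

theorem all_and' {α : Type} (l : List α) (p q : α → Bool) :
    (l.all fun x => p x && q x) = (l.all p && l.all q) := by
  induction l with
  | nil => rfl
  | cons x xs ih =>
    simp only [List.all_cons, ih]
    cases p x <;> cases q x <;> cases xs.all p <;> cases xs.all q <;> rfl

theorem flatMap_congr' {α β : Type} (l : List α) (f g : α → List β)
    (h : ∀ x ∈ l, f x = g x) : l.flatMap f = l.flatMap g := by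
  induction l with
  | nil => rfl
  | cons x xs ih =>
    simp only [List.flatMap_cons]
    rw [h x (by simp), ih (fun y hy => h y (by simp [hy]))]

-- internal pairwise check in B's vocabulary
def isAcB (s : List Int) : Bool := (pairsA s).all (fun p => incompB p.1 p.2)

-- "s extends the antichain c step by step": the check bfsB performs along a branch
def chainOK (c : List Int) : List Int → Bool
  | [] => true
  | x :: s => (c.all (fun y => incompB y x)) && chainOK (c ++ [x]) s

-- the size-r antichain extensions of chain c inside rest, in itertools order
def extB (r : Nat) (c : List Int) (rest : List Int) : List (List Int) :=
  ((combosA r rest).filter (fun s => chainOK c s)).map (fun s => c ++ s)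

theorem ext_zero (c rest : List Int) : extB 0 c rest = [c] := by
  simp [extB, combosA, chainOK]

theorem flatMap_single {α β : Type} (l : List α) (f : α → β) :
    l.flatMap (fun x => [f x]) = l.map f := by
  induction l <;> simp_all

theorem flatMap_assoc' {α β γ : Type} (l : List α) (f : α → List β) (g : β → List γ) :
    (l.flatMap f).flatMap g = l.flatMap (fun x => (f x).flatMap g) := by
  induction l <;> simp_all

theorem ext_succ (r : Nat) (c rest : List Int) :
    extB (r+1) c rest = (expandB c rest).flatMap (fun cr => extB r cr.1 cr.2) := by
  induction rest generalizing c with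
  | nil => simp [extB, combosA, expandB]
  | cons x xs ih =>
    by_cases h : c.all (fun y => incompB y x) = true
    · simp only [extB, combosA, expandB, h, if_true, List.filter_append, List.map_append,
        List.singleton_append, List.flatMap_cons]
      congr 1
      · rw [List.filter_map]
        rw [List.filter_congr (fun s (_ : s ∈ combosA r xs) =>
            show ((fun s => chainOK c s) ∘ fun s => x :: s) s = chainOK (c ++ [x]) s by
              simp [Function.comp, chainOK, h]), List.map_map]
        apply List.map_congr_left
        intro s _
        simp [Function.comp]
      · exact ih c
    · have hb : (c.all fun y => incompB y x) = false := Bool.eq_false_iff.mpr h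
      simp only [extB, combosA, expandB, hb, Bool.false_eq_true, if_false, List.filter_append,
        List.map_append, List.nil_append]
      rw [List.filter_map]
      rw [List.filter_congr (fun s (_ : s ∈ combosA r xs) =>
            show ((fun s => chainOK c s) ∘ fun s => x :: s) s = (fun _ => false) s by
              simp [Function.comp, chainOK, hb])]
      rw [List.filter_false]
      simpa [extB] using ih c

theorem bfsB_eq (fuel : Nat) (L : List (List Int × List Int)) :
    bfsB fuel L = (List.range fuel).flatMap
      (fun r => L.flatMap (fun cr => extB r cr.1 cr.2)) := by
  induction fuel generalizing L with
  | zero => cases L <;> simp [bfsB]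
  | succ n ih =>
    cases L with
    | nil => simp [bfsB]
    | cons c level =>
      have h1 : bfsB (n+1) (c :: level)
          = ((c :: level).map Prod.fst)
            ++ bfsB n ((c :: level).flatMap (fun cr => expandB cr.1 cr.2)) := rfl
      have hsplit : (0 :: List.map Nat.succ (List.range n)).flatMap
            (fun r => (c :: level).flatMap (fun cr => extB r cr.1 cr.2))
          = ((c :: level).flatMap (fun cr => extB 0 cr.1 cr.2))
            ++ (List.range n).flatMap
                (fun r => (c :: level).flatMap (fun cr => extB (r+1) cr.1 cr.2)) := by
        rw [List.flatMap_cons, List.flatMap_map]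
      rw [h1, ih, List.range_succ_eq_map, hsplit]
      congr 1
      · rw [show (fun cr : List Int × List Int => extB 0 cr.1 cr.2)
              = (fun cr : List Int × List Int => [cr.1]) from funext fun cr => ext_zero cr.1 cr.2]
        rw [flatMap_single]
      · apply flatMap_congr'
        intro r _
        rw [flatMap_assoc']
        apply flatMap_congr'
        intro cr _
        exact (ext_succ r cr.1 cr.2).symm

theorem isAcB_cons (x : Int) (s : List Int) :
    isAcB (x :: s) = ((s.all fun y => incompB x y) && isAcB s) := by
  simp [isAcB, pairsA, List.all_append, List.all_map, Function.comp_def]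

theorem chainOK_eq (s c : List Int) :
    chainOK c s = ((s.all fun b => c.all fun a => incompB a b) && isAcB s) := by
  induction s generalizing c with
  | nil => simp [chainOK, isAcB, pairsA]
  | cons x s ih =>
    simp only [chainOK, ih, List.all_cons, List.all_append, List.all_nil, Bool.and_true,
      isAcB_cons, all_and']
    cases c.all (fun a => incompB a x) <;>
      cases s.all (fun b => c.all fun a => incompB a b) <;>
      cases s.all (fun y => incompB x y) <;> cases isAcB s <;> rfl

theorem chainOK_nil (s : List Int) : chainOK [] s = isAcB s := by
  rw [chainOK_eq]
  simp

theorem combosA_sublist (r : Nat) (l s : List Int) (h : s ∈ combosA r l) : s.Sublist l := by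
  induction l generalizing r s with
  | nil =>
    cases r with
    | zero => simp [combosA] at h; simp [h]
    | succ r => simp [combosA] at h
  | cons x xs ih =>
    cases r with
    | zero => simp [combosA] at h; simp [h]
    | succ r =>
      simp only [combosA, List.mem_append, List.mem_map] at h
      rcases h with ⟨t, ht, rfl⟩ | h
      · exact (ih r t ht).cons₂ x
      · exact (ih (r+1) s h).cons x

theorem tail_mem_of_sublist {s l : List Int} (h : s.Sublist l) :
    ∀ b ∈ s.tail, b ∈ l.tail := by
  induction h with
  | slnil => simp
  | @cons s l a h ih =>
    intro b hb
    exact h.subset (List.mem_of_mem_tail hb)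
  | @cons₂ s l a h ih =>
    intro b hb
    exact h.subset hb

theorem pairsA_snd_mem (s : List Int) : ∀ p ∈ pairsA s, p.2 ∈ s.tail := by
  induction s with
  | nil => simp [pairsA]
  | cons x xs ih =>
    intro p hp
    simp only [pairsA, List.mem_append, List.mem_map] at hp
    rcases hp with ⟨y, hy, rfl⟩ | hp
    · simpa using hy
    · exact List.mem_of_mem_tail (ih p hp)

theorem mod_zero_left (b : Int) : PySem.Int.mod 0 b = 0 :=
  (PySem.Int.mod_eq_zero_iff_dvd 0 b).mpr (dvd_zero b)

theorem test_eq (a b : Int) (hb : b ≠ 0) :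
    (!(PySem.Int.mod a b == 0 || PySem.Int.mod b a == 0)) = incompB a b := by
  by_cases ha : a = 0
  · subst ha
    simp [incompB, mod_zero_left, hb]
  · have ha' : (a == 0) = false := by simp [ha]
    have hb' : (b == 0) = false := by simp [hb]
    simp [incompB, ha', hb', Bool.not_or]

theorem isAc_eq (s : List Int) (h : ∀ b ∈ s.tail, b ≠ 0) : isAcA s = isAcB s := by
  unfold isAcA isAcB
  apply all_congr'
  intro p hp
  exact test_eq p.1 p.2 (h p.2 (pairsA_snd_mem s p hp))

-- ===== VERDICT (by name: the statement is the Claim_ definition above) =====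
theorem antichains_spec : Claim_equal_antichains := by
  intro objs _ hpre
  unfold Spec_antichains
  have hA : antichains objs
      = (List.range (objs.length + 1)).flatMap (fun r => (combosA r objs).filter isAcA) := by
    unfold antichains
    rw [PySem.List.foldl_append_eq_flatMap]
    simp
  have hB : antichains_alt objs
      = (List.range (objs.length + 1)).flatMap (fun r => (combosA r objs).filter isAcB) := by
    unfold antichains_alt
    rw [bfsB_eq]
    apply flatMap_congr'
    intro r _
    simp [extB, chainOK_nil]
  rw [hA, hB]
  apply flatMap_congr'
  intro r _
  apply List.filter_congr
  intro s hs
  apply isAc_eq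
  intro b hb h0
  subst h0
  exact hpre (by
    rw [List.drop_one]
    exact tail_mem_of_sublist (combosA_sublist r objs s hs) 0 hb)

theorem antichains_raises : Claim_raises_antichains := by
  unfold Claim_raises_antichains
  refine ⟨fun objs _ hr hp => hp hr, ?_⟩
  decide

-- self-check of the raise witness: it indeed falls outside Pre_ (via antichains_raises)
theorem pvRaiseWitness_ok : ¬ Pre_antichains pvRaiseWitness_antichains := by
  have h := antichains_raises
  unfold Claim_raises_antichains at h
  exact h.1 pvRaiseWitness_antichains (by decide) (by decide)
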